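-- pv_equiv track=rewrite | github.com/avu-ua/Python-and-JS-codewars | Python/230908-task01.py | knight_vs_king
-- ===== SOURCE A (Python) =====
-- def knight_vs_king (knight_position, king_position):
--     ranks =[1, 2, 3, 4, 5, 6, 7, 8]
--     files = ['A', 'B', 'C', 'D', 'E', 'F', 'G', 'H']
--
--     knight_rank, knight_file = ranks.index(knight_position[0]), files.index(knight_position[1])
--     king_rank, king_file = ranks.index(king_position[0]), files.index(king_position[1])
--
--     knight_moves = [(1, 2), (1, -2), (-1, 2), (-1, -2), (2, 1), (2, -1), (-2, 1), (-2, -1)]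
--     king_moves = [(1, 1), (1, -1), (-1, 1), (-1, -1), (0, 1), (0, -1), (-1, 0), (1, 0)]
--
--     for i, j in knight_moves:
--         if king_rank == knight_rank + i and king_file == knight_file + j:
--             return "Knight"
--
--     for a, b in king_moves:
--         if knight_rank == king_rank + a and knight_file == king_file + b:
--             return "King"
--
--     return "None"
-- ===== SOURCE B (Python) =====
-- def knight_vs_king(knight_position, king_position):
--     ranks = [1, 2, 3, 4, 5, 6, 7, 8]
--     files = ['A', 'B', 'C', 'D', 'E', 'F', 'G', 'H']
--     dr = ranks.index(king_position[0]) - ranks.index(knight_position[0])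
--     df = files.index(king_position[1]) - files.index(knight_position[1])
--     adr, adf = abs(dr), abs(df)
--     if (adr, adf) in ((1, 2), (2, 1)):
--         return "Knight"
--     if max(adr, adf) == 1:
--         return "King"
--     return "None"
-- ===== Notes on version B (the rewrite author's own statement) =====
-- stated objective: simpler
-- what changed: Replaced the two explicit 8-offset move-list scans with closed-form arithmetic on the rank/file differences (abs-diff pair {1,2} for the knight, Chebyshev distance 1 for the king), keeping the ranks.index/files.index parsing so invalid coordinates still raise ValueError.
import Mathlib
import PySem

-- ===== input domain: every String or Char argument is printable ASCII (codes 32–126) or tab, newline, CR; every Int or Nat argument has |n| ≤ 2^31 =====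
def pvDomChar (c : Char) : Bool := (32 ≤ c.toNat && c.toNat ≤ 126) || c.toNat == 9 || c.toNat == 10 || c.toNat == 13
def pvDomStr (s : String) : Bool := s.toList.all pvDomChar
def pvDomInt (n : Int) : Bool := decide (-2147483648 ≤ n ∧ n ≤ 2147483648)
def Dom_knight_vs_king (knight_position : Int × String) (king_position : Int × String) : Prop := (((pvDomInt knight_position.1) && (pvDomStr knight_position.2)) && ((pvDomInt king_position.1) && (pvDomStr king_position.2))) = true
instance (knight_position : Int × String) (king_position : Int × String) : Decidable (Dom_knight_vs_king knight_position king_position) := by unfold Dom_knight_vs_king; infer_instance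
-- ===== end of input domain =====

-- B replaces A's two move-offset scans with closed-form abs-difference tests on the rank/file deltas (simpler; same index-based parsing, so the same inputs raise ValueError).


-- ===== PORT A =====
-- helpers for A's two early-return move-offset loops
def pvKnightLoop : List (Int × Int) → Int → Int → Int → Int → Bool
  | [], _, _, _, _ => false
  | (i, j) :: rest, knr, knf, kgr, kgf =>
    if kgr = knr + i ∧ kgf = knf + j then true
    else pvKnightLoop rest knr knf kgr kgf

def pvKingLoop : List (Int × Int) → Int → Int → Int → Int → Bool
  | [], _, _, _, _ => false
  | (a, b) :: rest, knr, knf, kgr, kgf =>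
    if knr = kgr + a ∧ knf = kgf + b then true
    else pvKingLoop rest knr knf kgr kgf

-- A's two early-return loops over the literal move lists, then "None"
def pvJudgeA (knr knf kgr kgf : Nat) : String :=
  let knight_moves : List (Int × Int) := [(1, 2), (1, -2), (-1, 2), (-1, -2), (2, 1), (2, -1), (-2, 1), (-2, -1)]
  let king_moves : List (Int × Int) := [(1, 1), (1, -1), (-1, 1), (-1, -1), (0, 1), (0, -1), (-1, 0), (1, 0)]
  if pvKnightLoop knight_moves (knr : Int) (knf : Int) (kgr : Int) (kgf : Int) then "Knight"
  else if pvKingLoop king_moves (knr : Int) (knf : Int) (kgr : Int) (kgf : Int) then "King"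
  else "None"

def knight_vs_king (knight_position : Int × String) (king_position : Int × String) : String :=
  let ranks : List Int := [1, 2, 3, 4, 5, 6, 7, 8]
  let files : List String := ["A", "B", "C", "D", "E", "F", "G", "H"]
  match PySem.List.index? ranks knight_position.1, PySem.List.index? files knight_position.2,
        PySem.List.index? ranks king_position.1, PySem.List.index? files king_position.2 with
  | some knr, some knf, some kgr, some kgf => pvJudgeA knr knf kgr kgf
  | _, _, _, _ => ""  -- ValueError in Python; excluded by Pre_

-- ===== PORT B =====
-- B's closed-form judgement on the parsed indices
def pvJudgeB (r2 r1 f2 f1 : Nat) : String :=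
  let dr : Int := (r2 : Int) - (r1 : Int)
  let df : Int := (f2 : Int) - (f1 : Int)
  let adr := |dr|
  let adf := |df|
  if (adr, adf) = (1, 2) ∨ (adr, adf) = (2, 1) then "Knight"
  else if max adr adf = 1 then "King"
  else "None"

def knight_vs_king_alt (knight_position : Int × String) (king_position : Int × String) : String :=
  let ranks : List Int := [1, 2, 3, 4, 5, 6, 7, 8]
  let files : List String := ["A", "B", "C", "D", "E", "F", "G", "H"]
  match PySem.List.index? ranks king_position.1 with
  | none => ""  -- ValueError in Python; excluded by Pre_
  | some r2 =>
    match PySem.List.index? ranks knight_position.1 with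
    | none => ""
    | some r1 =>
      match PySem.List.index? files king_position.2 with
      | none => ""
      | some f2 =>
        match PySem.List.index? files knight_position.2 with
        | none => ""
        | some f1 => pvJudgeB r2 r1 f2 f1

-- ===== PRECONDITION & SPEC =====
-- Pre_ excludes exactly the inputs on which A's ranks.index / files.index raises ValueError.
def Pre_knight_vs_king (knight_position : Int × String) (king_position : Int × String) : Prop :=
  knight_position.1 ∈ ([1, 2, 3, 4, 5, 6, 7, 8] : List Int) ∧
  knight_position.2 ∈ (["A", "B", "C", "D", "E", "F", "G", "H"] : List String) ∧
  king_position.1 ∈ ([1, 2, 3, 4, 5, 6, 7, 8] : List Int) ∧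
  king_position.2 ∈ (["A", "B", "C", "D", "E", "F", "G", "H"] : List String)
instance (knight_position : Int × String) (king_position : Int × String) : Decidable (Pre_knight_vs_king knight_position king_position) := by unfold Pre_knight_vs_king; infer_instance
def pvWitness_knight_vs_king : (Int × String) × (Int × String) := ((1, "A"), (2, "C"))
def Spec_knight_vs_king (knight_position : Int × String) (king_position : Int × String) (out : String) : Prop := out = knight_vs_king_alt knight_position king_position
instance (knight_position : Int × String) (king_position : Int × String) (out : String) : Decidable (Spec_knight_vs_king knight_position king_position out) := by unfold Spec_knight_vs_king; infer_instance

-- ===== CLAIM (what is proved, stated in full; the proofs are below) =====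
def Claim_equal_knight_vs_king : Prop := ∀ (knight_position : Int × String) (king_position : Int × String), Dom_knight_vs_king knight_position king_position → Pre_knight_vs_king knight_position king_position → Spec_knight_vs_king knight_position king_position (knight_vs_king knight_position king_position)

-- ===== LEMMAS AND PROOFS =====

-- loop characterisations: A's offset scans as closed-form predicates (valid for ALL integers)
theorem pvKnight_iff (a b c d : Int) :
    pvKnightLoop [(1, 2), (1, -2), (-1, 2), (-1, -2), (2, 1), (2, -1), (-2, 1), (-2, -1)] a b c d = true
    ↔ ((|c - a|, |d - b|) = ((1 : Int), (2 : Int)) ∨ (|c - a|, |d - b|) = ((2 : Int), (1 : Int))) := by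
  simp only [pvKnightLoop, Prod.ext_iff, Bool.if_true_left, Bool.or_eq_true,
    decide_eq_true_eq, Bool.false_eq_true, or_false]
  rcases abs_cases (c - a) with ⟨h1, _⟩ | ⟨h1, _⟩ <;> rcases abs_cases (d - b) with ⟨h2, _⟩ | ⟨h2, _⟩ <;>
    rw [h1, h2] <;> omega

theorem pvKing_iff (a b c d : Int) :
    pvKingLoop [(1, 1), (1, -1), (-1, 1), (-1, -1), (0, 1), (0, -1), (-1, 0), (1, 0)] a b c d = true
    ↔ max |c - a| |d - b| = 1 := by
  simp only [pvKingLoop, Bool.if_true_left, Bool.or_eq_true,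
    decide_eq_true_eq, Bool.false_eq_true, or_false]
  rcases abs_cases (c - a) with ⟨h1, _⟩ | ⟨h1, _⟩ <;> rcases abs_cases (d - b) with ⟨h2, _⟩ | ⟨h2, _⟩ <;>
    rw [h1, h2] <;> rw [max_def] <;> split_ifs <;> omega

theorem pvJudge_eq (n1 n2 n3 n4 : Nat) : pvJudgeA n1 n2 n3 n4 = pvJudgeB n3 n1 n4 n2 := by
  simp only [pvJudgeA, pvJudgeB]
  have hk := pvKnight_iff (n1 : Int) (n2 : Int) (n3 : Int) (n4 : Int)
  have hg := pvKing_iff (n1 : Int) (n2 : Int) (n3 : Int) (n4 : Int)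
  by_cases hP : ((|(n3 : Int) - (n1 : Int)|, |(n4 : Int) - (n2 : Int)|) = ((1 : Int), (2 : Int)) ∨
      (|(n3 : Int) - (n1 : Int)|, |(n4 : Int) - (n2 : Int)|) = ((2 : Int), (1 : Int)))
  · rw [if_pos (hk.mpr hP), if_pos hP]
  · rw [if_neg (fun h => hP (hk.mp h)), if_neg hP]
    by_cases hQ : max |(n3 : Int) - (n1 : Int)| |(n4 : Int) - (n2 : Int)| = 1
    · rw [if_pos (hg.mpr hQ), if_pos hQ]
    · rw [if_neg (fun h => hQ (hg.mp h)), if_neg hQ]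

-- ===== VERDICT (by name: the statement is the Claim_ definition above) =====
theorem knight_vs_king_spec : Claim_equal_knight_vs_king := by
  rintro ⟨k1, k2⟩ ⟨g1, g2⟩ _ ⟨h1, h2, h3, h4⟩
  obtain ⟨n1, e1⟩ := Option.isSome_iff_exists.mp
    ((PySem.List.index?_isSome_iff ([1, 2, 3, 4, 5, 6, 7, 8] : List Int) k1).mpr h1)
  obtain ⟨n2, e2⟩ := Option.isSome_iff_exists.mp
    ((PySem.List.index?_isSome_iff (["A", "B", "C", "D", "E", "F", "G", "H"] : List String) k2).mpr h2)
  obtain ⟨n3, e3⟩ := Option.isSome_iff_exists.mp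
    ((PySem.List.index?_isSome_iff ([1, 2, 3, 4, 5, 6, 7, 8] : List Int) g1).mpr h3)
  obtain ⟨n4, e4⟩ := Option.isSome_iff_exists.mp
    ((PySem.List.index?_isSome_iff (["A", "B", "C", "D", "E", "F", "G", "H"] : List String) g2).mpr h4)
  show knight_vs_king (k1, k2) (g1, g2) = knight_vs_king_alt (k1, k2) (g1, g2)
  simp only [knight_vs_king, knight_vs_king_alt, e1, e2, e3, e4]
  exact pvJudge_eq n1 n2 n3 n4
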